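-- pv_equiv track=rewrite | github.com/sohanipayla/PYTHON | T2_CH-5_SEM-3/PB395.py | countSpecialElements
-- ===== SOURCE A (Python) =====
-- def countSpecialElements(A):
--     count = 0
--     n = len(A)
--     for i in range(n):
--         temp = A[:i] + A[i+1:]
--         even_sum = sum(temp[j] for j in range(0, len(temp), 2))
--         odd_sum = sum(temp[j] for j in range(1, len(temp), 2))
--
--         if even_sum == odd_sum:
--             count += 1
--     return count
-- ===== SOURCE B (Python) =====
-- def countSpecialElements(A):
--     # One pass with prefix/suffix even- and odd-indexed sums; removing A[i]
--     # flips the parity of every later position, so each index is O(1).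
--     tot_e = tot_o = 0
--     for i, x in enumerate(A):
--         if i % 2 == 0:
--             tot_e += x
--         else:
--             tot_o += x
--     count = 0
--     pre_e = pre_o = 0
--     for i, x in enumerate(A):
--         if i % 2 == 0:
--             tot_e -= x
--         else:
--             tot_o -= x
--         if pre_e + tot_o == pre_o + tot_e:
--             count += 1
--         if i % 2 == 0:
--             pre_e += x
--         else:
--             pre_o += x
--     return count
-- ===== Notes on version B (the rewrite author's own statement) =====
-- stated objective: faster
-- what changed: Replaces the per-index rebuild of the list and fresh even/odd sums (O(n) work per index) with one pass maintaining prefix and suffix even/odd-indexed sums, using the fact that removing an element flips the parity of all later positions.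
import Mathlib
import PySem

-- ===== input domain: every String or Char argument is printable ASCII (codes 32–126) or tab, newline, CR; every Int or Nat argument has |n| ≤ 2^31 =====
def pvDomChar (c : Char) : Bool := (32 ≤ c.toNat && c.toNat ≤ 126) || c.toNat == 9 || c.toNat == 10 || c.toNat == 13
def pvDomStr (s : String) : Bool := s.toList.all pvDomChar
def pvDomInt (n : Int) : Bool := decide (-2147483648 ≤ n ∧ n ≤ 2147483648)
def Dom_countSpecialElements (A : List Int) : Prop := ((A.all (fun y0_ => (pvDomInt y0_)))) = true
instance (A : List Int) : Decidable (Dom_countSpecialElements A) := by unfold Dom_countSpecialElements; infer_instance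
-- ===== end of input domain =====

-- B replaces A's O(n^2) per-index rebuild with one O(n) pass over prefix/suffix
-- even/odd-indexed sums (removal flips the parity of later positions).

-- ===== PORT A =====
def countSpecialElements (A : List Int) : Int :=
  let n : Int := (A.length : Int)
  (PySem.List.pyRange 0 n 1).foldl (fun count i =>
    let temp := PySem.List.slice A none (some i) ++ PySem.List.slice A (some (i + 1)) none
    let even_sum := (PySem.List.pyRange 0 (temp.length : Int) 2).foldl
      (fun s j => s + PySem.List.pyGetD temp j 0) 0
    let odd_sum := (PySem.List.pyRange 1 (temp.length : Int) 2).foldl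
      (fun s j => s + PySem.List.pyGetD temp j 0) 0
    if even_sum = odd_sum then count + 1 else count) 0

-- ===== PORT B =====
def countSpecialElements_alt (A : List Int) : Int :=
  let tot := (PySem.List.enumerate A 0).foldl
    (fun (p : Int × Int) ix =>
      if PySem.Int.mod ix.1 2 = 0 then (p.1 + ix.2, p.2) else (p.1, p.2 + ix.2)) (0, 0)
  let st := (PySem.List.enumerate A 0).foldl
    (fun (s : Int × Int × Int × Int × Int) ix =>
      let te := if PySem.Int.mod ix.1 2 = 0 then s.2.2.2.1 - ix.2 else s.2.2.2.1
      let toO := if PySem.Int.mod ix.1 2 = 0 then s.2.2.2.2 else s.2.2.2.2 - ix.2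
      let c := if s.2.1 + toO = s.2.2.1 + te then s.1 + 1 else s.1
      let pe := if PySem.Int.mod ix.1 2 = 0 then s.2.1 + ix.2 else s.2.1
      let po := if PySem.Int.mod ix.1 2 = 0 then s.2.2.1 else s.2.2.1 + ix.2
      (c, pe, po, te, toO)) (0, 0, 0, tot.1, tot.2)
  st.1

-- ===== PRECONDITION & SPEC =====
def Spec_countSpecialElements (A : List Int) (out : Int) : Prop := out = countSpecialElements_alt A
instance (A : List Int) (out : Int) : Decidable (Spec_countSpecialElements A out) := by unfold Spec_countSpecialElements; infer_instance

-- ===== CLAIM (what is proved, stated in full; the proofs are below) =====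
def Claim_equal_countSpecialElements : Prop := ∀ (A : List Int), Dom_countSpecialElements A → Spec_countSpecialElements A (countSpecialElements A)

-- ===== LEMMAS AND PROOFS =====

/-- Sum of the even-indexed elements. -/
def sumE : List Int → Int
  | [] => 0
  | [x] => x
  | x :: _ :: xs => x + sumE xs

/-- Sum of the odd-indexed elements. -/
def sumO (l : List Int) : Int := sumE l.tail

lemma sumE_cons (x : Int) (xs : List Int) : sumE (x :: xs) = x + sumO xs := by
  cases xs <;> simp [sumE, sumO]

lemma sumO_cons (x : Int) (xs : List Int) : sumO (x :: xs) = sumE xs := rfl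

lemma sum_append : ∀ (u v : List Int),
    sumE (u ++ v) = sumE u + (if Even u.length then sumE v else sumO v) ∧
    sumO (u ++ v) = sumO u + (if Even u.length then sumO v else sumE v) := by
  intro u
  induction u with
  | nil => intro v; simp [sumE, sumO]
  | cons x u ih =>
    intro v
    have h1 := (ih v).1
    have h2 := (ih v).2
    by_cases h : Even u.length <;>
      simp [List.cons_append, sumE_cons, sumO_cons, h1, h2, h, Nat.even_add_one] <;> ring

/-- Python-side Boolean of the per-index condition: after deleting index `i`,
    the even- and odd-indexed sums agree. -/
def condB (A : List Int) (i : Nat) : Bool :=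
  decide (sumE (A.take i ++ A.drop (i + 1)) = sumO (A.take i ++ A.drop (i + 1)))

lemma bridge (A : List Int) (i : Nat) (hi : i < A.length) :
    (sumE (A.take i) + (sumO A - sumO (A.take (i + 1))) =
      sumO (A.take i) + (sumE A - sumE (A.take (i + 1)))) ↔
    (sumE (A.take i ++ A.drop (i + 1)) = sumO (A.take i ++ A.drop (i + 1))) := by
  have hx : A[i]? = some A[i] := List.getElem?_eq_getElem hi
  have ht : A.take (i + 1) = A.take i ++ [A[i]] := by
    rw [List.take_succ, hx]; rfl
  have hA : A = (A.take i ++ [A[i]]) ++ A.drop (i + 1) := by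
    rw [← ht, List.take_append_drop]
  have hlu : (A.take i).length = i := by simp [hi.le]
  have hlux : (A.take i ++ [A[i]]).length = i + 1 := by simp [hlu]; omega
  have hE := (sum_append (A.take i ++ [A[i]]) (A.drop (i + 1))).1
  have hO := (sum_append (A.take i ++ [A[i]]) (A.drop (i + 1))).2
  have hE2 := (sum_append (A.take i) [A[i]]).1
  have hO2 := (sum_append (A.take i) [A[i]]).2
  have hED := (sum_append (A.take i) (A.drop (i + 1))).1
  have hOD := (sum_append (A.take i) (A.drop (i + 1))).2
  rw [hlux] at hE hO
  rw [hlu] at hE2 hO2 hED hOD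
  have hEA : sumE A = sumE ((A.take i ++ [A[i]]) ++ A.drop (i + 1)) := congrArg sumE hA
  have hOA : sumO A = sumO ((A.take i ++ [A[i]]) ++ A.drop (i + 1)) := congrArg sumO hA
  have hE1 : sumE (A.take (i + 1)) = sumE (A.take i ++ [A[i]]) := congrArg sumE ht
  have hO1 : sumO (A.take (i + 1)) = sumO (A.take i ++ [A[i]]) := congrArg sumO ht
  have hsx : sumE [A[i]] = A[i] := rfl
  have hox : sumO [A[i]] = 0 := rfl
  by_cases h : Even i
  · have h1 : ¬ Even (i + 1) := by simp [Nat.even_add_one, h]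
    rw [if_pos h] at hE2 hO2 hED hOD
    rw [if_neg h1] at hE hO
    omega
  · have h1 : Even (i + 1) := by simp [Nat.even_add_one, h]
    rw [if_neg h] at hE2 hO2 hED hOD
    rw [if_pos h1] at hE hO
    omega

lemma foldl_add_sum (g : Int → Int) :
    ∀ (l : List Int) (c : Int), l.foldl (fun s j => s + g j) c = c + (l.map g).sum := by
  intro l
  induction l with
  | nil => intro c; simp
  | cons x l ih => intro c; simp [List.foldl_cons, ih]; ring

lemma oddMap_eq (t : List Int) :
    (PySem.List.pyRange 1 (t.length : Int) 2).map (fun j => PySem.List.pyGetD t j 0)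
      = (PySem.List.pyRange 0 (t.tail.length : Int) 2).map (fun j => PySem.List.pyGetD t.tail j 0) := by
  cases t with
  | nil => simp [PySem.List.pyRange_of_pos]
  | cons x xs =>
    rw [PySem.List.pyRange_of_pos 1 _ (by norm_num), PySem.List.pyRange_of_pos 0 _ (by norm_num)]
    simp only [List.map_map, List.tail_cons, List.length_cons]
    have hc : (if (1 : Int) < ((xs.length : Int) + 1) then ((((xs.length : Int) + 1) - 1 + 2 - 1) / 2).toNat else 0)
        = (if (0 : Int) < (xs.length : Int) then (((xs.length : Int) - 0 + 2 - 1) / 2).toNat else 0) := by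
      split_ifs <;> omega
    push_cast at hc ⊢
    rw [hc]
    refine List.map_congr_left (fun k _ => ?_)
    simp only [Function.comp]
    rw [PySem.List.pyGetD_of_nonneg _ _ (by positivity), PySem.List.pyGetD_of_nonneg _ _ (by positivity)]
    have h1 : ((1 : Int) + 2 * (k : Int)).toNat = (0 + 2 * (k : Int)).toNat + 1 := by omega
    rw [h1, List.getD_cons_succ]

lemma evenMap_sum : ∀ (t : List Int),
    ((PySem.List.pyRange 0 (t.length : Int) 2).map (fun j => PySem.List.pyGetD t j 0)).sum = sumE t := by
  intro t
  induction t using sumE.induct with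
  | case1 => simp [PySem.List.pyRange_of_pos, sumE]
  | case2 x =>
    rw [PySem.List.pyRange_of_pos 0 _ (by norm_num)]
    norm_num
    simp [sumE]
  | case3 x y xs ih =>
    rw [PySem.List.pyRange_of_pos 0 _ (by norm_num)]
    rw [PySem.List.pyRange_of_pos 0 _ (by norm_num)] at ih
    simp only [List.length_cons]
    have hc : (if (0 : Int) < ((xs.length : Int) + 1 + 1) then ((((xs.length : Int) + 1 + 1) - 0 + 2 - 1) / 2).toNat else 0)
        = (if (0 : Int) < (xs.length : Int) then (((xs.length : Int) - 0 + 2 - 1) / 2).toNat else 0) + 1 := by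
      split_ifs <;> omega
    push_cast at hc ⊢
    rw [hc, List.range_succ_eq_map]
    simp only [List.map_cons, List.map_map, List.sum_cons]
    have h0 : PySem.List.pyGetD (x :: y :: xs) ((0 : Int) + 2 * ((0 : Nat) : Int)) 0 = x := by
      rw [PySem.List.pyGetD_of_nonneg _ _ (by norm_num)]
      norm_num
    have hF : ((fun j => PySem.List.pyGetD (x :: y :: xs) j 0) ∘ (fun k : Nat => 0 + 2 * (k : Int)) ∘ Nat.succ)
        = ((fun j => PySem.List.pyGetD xs j 0) ∘ (fun k : Nat => 0 + 2 * (k : Int))) := by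
      funext k
      simp only [Function.comp_apply]
      rw [PySem.List.pyGetD_of_nonneg _ _ (by positivity), PySem.List.pyGetD_of_nonneg _ _ (by positivity)]
      have h1 : ((0 : Int) + 2 * ((Nat.succ k : Nat) : Int)).toNat = (((0 : Int) + 2 * (k : Int)).toNat + 1) + 1 := by
        push_cast; omega
      rw [h1, List.getD_cons_succ, List.getD_cons_succ]
    rw [h0, hF]
    rw [List.map_map] at ih
    rw [ih]
    simp [sumE]

lemma foldl_if_count (p : Nat → Bool) :
    ∀ (l : List Nat) (c : Int),
      l.foldl (fun s i => if p i then s + 1 else s) c = c + (l.countP p : Int) := by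
  intro l
  induction l with
  | nil => intro c; simp
  | cons x l ih =>
    intro c
    by_cases h : p x = true <;> simp [List.foldl_cons, ih, h] <;> push_cast <;> ring

lemma mod_two_cast (k : Nat) : (PySem.Int.mod (k : Int) 2 = 0) ↔ Even k := by
  rw [PySem.Int.mod_eq_emod_of_pos (by norm_num)]
  rw [← Int.even_iff, Int.even_coe_nat]

lemma oddMap_sum (t : List Int) :
    ((PySem.List.pyRange 1 (t.length : Int) 2).map (fun j => PySem.List.pyGetD t j 0)).sum = sumO t := by
  rw [oddMap_eq, evenMap_sum]
  rfl

lemma A_eq_count (A : List Int) :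
    countSpecialElements A = ((List.range A.length).countP (condB A) : Int) := by
  simp only [countSpecialElements]
  rw [PySem.List.pyRange_one]
  have hn : (((A.length : Int)) - 0).toNat = A.length := by omega
  rw [hn, List.foldl_map]
  rw [PySem.List.foldl_congr_mem (List.range A.length) _
      (fun (c : Int) (i : Nat) => if condB A i then c + 1 else c) 0 ?side]
  case side =>
    intro acc i hi
    have hilt : i < A.length := List.mem_range.mp hi
    simp only [zero_add]
    rw [PySem.List.slice_to_natCast A i]
    have hcast : ((i : Int) + 1) = (((i + 1 : Nat)) : Int) := by push_cast; ring
    rw [hcast, PySem.List.slice_from_natCast A (i + 1)]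
    rw [foldl_add_sum, foldl_add_sum, evenMap_sum, oddMap_sum]
    simp [condB]
  rw [foldl_if_count (condB A) (List.range A.length) 0, zero_add]

lemma tot_loop (r : List Int) :
    ∀ (k : Nat) (te tob : Int),
      (PySem.List.enumerate r (k : Int)).foldl
        (fun (p : Int × Int) ix =>
          if PySem.Int.mod ix.1 2 = 0 then (p.1 + ix.2, p.2) else (p.1, p.2 + ix.2)) (te, tob)
      = (te + (if Even k then sumE r else sumO r), tob + (if Even k then sumO r else sumE r)) := by
  induction r with
  | nil => intro k te tob; simp [PySem.List.enumerate, sumE, sumO]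
  | cons x r ih =>
    intro k te tob
    rw [PySem.List.enumerate_cons, List.foldl_cons]
    have hcast : ((k : Int) + 1) = (((k + 1 : Nat)) : Int) := by push_cast; ring
    by_cases h : Even k
    · rw [if_pos ((mod_two_cast k).2 h)]
      rw [hcast, ih (k + 1) (te + x) tob]
      have h1 : ¬ Even (k + 1) := by simp [Nat.even_add_one, h]
      simp [h, h1, sumE_cons, sumO_cons, add_assoc]
    · rw [if_neg (fun hc => h ((mod_two_cast k).1 hc))]
      rw [hcast, ih (k + 1) te (tob + x)]
      have h1 : Even (k + 1) := Nat.even_add_one.2 h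
      simp [h, h1, sumE_cons, sumO_cons, add_assoc]

lemma main_loop (A : List Int) :
    ∀ (r : List Int) (k : Nat) (c : Int), A.drop k = r →
      ((PySem.List.enumerate r (k : Int)).foldl
        (fun (s : Int × Int × Int × Int × Int) ix =>
          let te := if PySem.Int.mod ix.1 2 = 0 then s.2.2.2.1 - ix.2 else s.2.2.2.1
          let toO := if PySem.Int.mod ix.1 2 = 0 then s.2.2.2.2 else s.2.2.2.2 - ix.2
          let c := if s.2.1 + toO = s.2.2.1 + te then s.1 + 1 else s.1
          let pe := if PySem.Int.mod ix.1 2 = 0 then s.2.1 + ix.2 else s.2.1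
          let po := if PySem.Int.mod ix.1 2 = 0 then s.2.2.1 else s.2.2.1 + ix.2
          (c, pe, po, te, toO))
        (c, sumE (A.take k), sumO (A.take k), sumE A - sumE (A.take k), sumO A - sumO (A.take k))).1
      = c + ((List.range' k r.length).countP (condB A) : Int) := by
  intro r
  induction r with
  | nil => intro k c _; simp [PySem.List.enumerate]
  | cons x r ih =>
    intro k c hr
    have hk : k < A.length := by
      have := congrArg List.length hr
      simp at this
      omega
    have hx : A[k]? = some x := by
      have h0 : (A.drop k)[0]? = some x := by rw [hr]; rfl
      rwa [List.getElem?_drop, Nat.add_zero] at h0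
    have ht : A.take (k + 1) = A.take k ++ [x] := by
      rw [List.take_succ, hx]; rfl
    have hd : A.drop (k + 1) = r := by rw [← List.tail_drop, hr]; rfl
    have hlu : (A.take k).length = k := by simp [hk.le]
    have hE2 := (sum_append (A.take k) [x]).1
    have hO2 := (sum_append (A.take k) [x]).2
    rw [hlu] at hE2 hO2
    have hsx : sumE [x] = x := rfl
    have hox : sumO [x] = 0 := rfl
    rw [hsx] at hE2
    rw [hox] at hO2
    have hE1 : sumE (A.take (k + 1)) = sumE (A.take k) + (if Even k then x else 0) := by
      rw [ht, hE2]; split_ifs <;> rfl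
    have hO1 : sumO (A.take (k + 1)) = sumO (A.take k) + (if Even k then 0 else x) := by
      rw [ht, hO2]; split_ifs <;> rfl
    rw [PySem.List.enumerate_cons, List.foldl_cons]
    have hcast : ((k : Int) + 1) = (((k + 1 : Nat)) : Int) := by push_cast; ring
    have hrange : List.range' k (x :: r).length = k :: List.range' (k + 1) r.length := by
      rw [List.length_cons, List.range'_succ]
    have hcnt : (List.range' k (x :: r).length).countP (condB A)
        = (if condB A k then 1 else 0) + (List.range' (k + 1) r.length).countP (condB A) := by
      rw [hrange, List.countP_cons]
      by_cases hc : condB A k = true <;> simp [hc] <;> omega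
    by_cases hEk : Even k
    · have hm : (PySem.Int.mod (k : Int) 2 = 0) = True := eq_true ((mod_two_cast k).2 hEk)
      simp only [hm, if_true]
      have hte : sumE A - sumE (A.take k) - x = sumE A - sumE (A.take (k + 1)) := by
        rw [hE1]; simp [hEk]; try omega
      have hto : sumO A - sumO (A.take k) = sumO A - sumO (A.take (k + 1)) := by
        rw [hO1]; simp [hEk]; try omega
      have hpe : sumE (A.take k) + x = sumE (A.take (k + 1)) := by rw [hE1]; simp [hEk]; try omega
      have hpo : sumO (A.take k) = sumO (A.take (k + 1)) := by rw [hO1]; simp [hEk]; try omega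
      have hcnd : (sumE (A.take k) + (sumO A - sumO (A.take k))
          = sumO (A.take k) + (sumE A - sumE (A.take k) - x)) ↔ (condB A k = true) := by
        rw [hte, hto, bridge A k hk]
        simp [condB]
      by_cases hc : condB A k = true
      · rw [if_pos (hcnd.2 hc)]
        rw [hte, hto, hpe, hpo, hcast, ih (k + 1) (c + 1) hd]
        rw [hcnt]
        simp [hc]
        omega
      · rw [if_neg (fun hh => hc (hcnd.1 hh))]
        rw [hte, hto, hpe, hpo, hcast, ih (k + 1) c hd]
        rw [hcnt]
        simp [hc]
    · have hm : (PySem.Int.mod (k : Int) 2 = 0) = False :=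
        eq_false (fun hh => hEk ((mod_two_cast k).1 hh))
      simp only [hm, if_false]
      have hte : sumE A - sumE (A.take k) = sumE A - sumE (A.take (k + 1)) := by
        rw [hE1]; simp [hEk]; try omega
      have hto : sumO A - sumO (A.take k) - x = sumO A - sumO (A.take (k + 1)) := by
        rw [hO1]; simp [hEk]; try omega
      have hpe : sumE (A.take k) = sumE (A.take (k + 1)) := by rw [hE1]; simp [hEk]; try omega
      have hpo : sumO (A.take k) + x = sumO (A.take (k + 1)) := by rw [hO1]; simp [hEk]; try omega
      have hcnd : (sumE (A.take k) + (sumO A - sumO (A.take k) - x)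
          = sumO (A.take k) + (sumE A - sumE (A.take k))) ↔ (condB A k = true) := by
        rw [hte, hto, bridge A k hk]
        simp [condB]
      by_cases hc : condB A k = true
      · rw [if_pos (hcnd.2 hc)]
        rw [hte, hto, hpe, hpo, hcast, ih (k + 1) (c + 1) hd]
        rw [hcnt]
        simp [hc]
        omega
      · rw [if_neg (fun hh => hc (hcnd.1 hh))]
        rw [hte, hto, hpe, hpo, hcast, ih (k + 1) c hd]
        rw [hcnt]
        simp [hc]

lemma B_eq_count (A : List Int) :
    countSpecialElements_alt A = ((List.range A.length).countP (condB A) : Int) := by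
  simp only [countSpecialElements_alt]
  have hse : sumE ([] : List Int) = 0 := rfl
  have hso : sumO ([] : List Int) = 0 := rfl
  have h2 := tot_loop A 0 0 0
  rw [if_pos (Even.zero), if_pos (Even.zero)] at h2
  simp only [Nat.cast_zero, zero_add] at h2
  have h := main_loop A A 0 0 (by simp)
  simp only [Nat.cast_zero, List.take_zero, hse, hso, sub_zero, zero_add] at h
  rw [List.range_eq_range', h2]
  exact h

-- ===== VERDICT (by name: the statement is the Claim_ definition above) =====
theorem countSpecialElements_spec : Claim_equal_countSpecialElements := by
  intro A _
  unfold Spec_countSpecialElements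
  rw [A_eq_count, B_eq_count]
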